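-- pv_equiv track=rewrite | github.com/leonti98/CS50 | CS50X/Week6/dna/dna.py | find_tandem_repeats
-- ===== SOURCE A (Python) =====
-- def find_tandem_repeats(sequence, search):
--     """ searches through an DNA sequence and returns (position, repeats) tuples """
--     if sequence == '' or search == '':
--         return
--
--     lengths = list(map(len, sequence.split(search)))
--     pos = lengths[0]
--     repeats = 0
--     pending = False
--
--     for l in lengths[1:]:
--         if l == 0:
--             pending = True
--             repeats += 1
--             continue
--         repeats += 1
--         yield (pos, repeats)
--         pos += l + len(search) * repeats
--         repeats = 0
--         pending = False
--
--     if pending: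
--         yield (pos, repeats)
-- ===== SOURCE B (Python) =====
-- def find_tandem_repeats(sequence, search):
--     """ searches through an DNA sequence and returns (position, repeats) tuples """
--     if sequence == '' or search == '':
--         return
--
--     k = len(search)
--     # collect the start indices of all (non-overlapping, leftmost) occurrences
--     idxs = []
--     i = sequence.find(search)
--     while i != -1:
--         idxs.append(i)
--         i = sequence.find(search, i + k)
--
--     # group maximal runs of indices spaced exactly k apart
--     j = 0
--     n = len(idxs)
--     while j < n:
--         start = idxs[j]
--         count = 1
--         while j + 1 < n and idxs[j + 1] == idxs[j] + k:
--             j += 1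
--             count += 1
--         yield (start, count)
--         j += 1
-- ===== Notes on version B (the rewrite author's own statement) =====
-- stated objective: alternative
-- what changed: B replaces A's split-on-search pass over piece lengths (with pos/repeats/pending state threaded through a fold) by a find-loop that collects the occurrence start indices directly and then groups maximal runs of indices spaced exactly len(search) apart.
import Mathlib
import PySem

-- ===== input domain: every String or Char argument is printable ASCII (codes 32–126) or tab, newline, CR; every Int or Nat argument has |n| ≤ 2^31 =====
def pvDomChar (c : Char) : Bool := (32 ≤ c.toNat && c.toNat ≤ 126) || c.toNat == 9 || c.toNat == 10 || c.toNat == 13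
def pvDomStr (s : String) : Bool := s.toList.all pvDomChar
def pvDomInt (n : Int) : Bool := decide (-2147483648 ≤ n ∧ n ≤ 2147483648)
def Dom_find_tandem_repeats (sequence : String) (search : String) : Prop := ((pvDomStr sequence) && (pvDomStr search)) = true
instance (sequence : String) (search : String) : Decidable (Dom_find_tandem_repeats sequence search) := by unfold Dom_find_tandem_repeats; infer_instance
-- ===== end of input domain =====

-- B collects occurrence start indices with a find-loop and groups maximal runs spaced len(search)
-- apart, instead of A's split-on-search fold over piece lengths (alternative decomposition, same cost).


-- ===== PORT A =====
-- literal port of A: split the sequence on search, walk the piece lengths with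
-- (pos, repeats, pending) state, collecting the yields in `out`.
def find_tandem_repeats (sequence : String) (search : String) : List (Int × Int) :=
  if sequence = "" ∨ search = "" then []
  else
    let lengths : List Int :=
      (PySem.Chars.splitOn sequence.toList search.toList).map (fun p => (p.length : Int))
    match lengths with
    | [] => []   -- unreachable: str.split never returns an empty list
    | pos0 :: rest =>
      let st := rest.foldl
        (fun (st : Int × Int × Bool × List (Int × Int)) l =>
          -- st = (pos, repeats, pending, out)
          if l = 0 then (st.1, st.2.1 + 1, true, st.2.2.2)
          else (st.1 + l + (PySem.Str.len search : Int) * (st.2.1 + 1), 0, false,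
                st.2.2.2 ++ [(st.1, st.2.1 + 1)]))
        (pos0, 0, false, [])
      if st.2.2.1 then st.2.2.2 ++ [(st.1, st.2.1)] else st.2.2.2

-- ===== PORT B =====
-- termination fact for the find-loop: a start past the end finds nothing
theorem pvFindFrom_past (s sub : List Char) (start : Nat) (h : s.length < start) :
    PySem.Chars.findFrom s sub (start : Int) none = -1 := by
  simp only [PySem.Chars.findFrom]
  rw [if_pos (by exact_mod_cast h)]

-- Source B's first while loop: i = find(search); while i != -1: append i; i = find(search, i+k)
def pvCollectIdxs (s sub : List Char) (hsub : sub ≠ []) (start : Nat) : List Nat :=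
  let r := PySem.Chars.findFrom s sub (start : Int) none
  if h : r = -1 then []
  else r.toNat :: pvCollectIdxs s sub hsub (r.toNat + sub.length)
  termination_by s.length + 1 - start
  decreasing_by
    have hle : start ≤ s.length := by
      by_contra hlt
      exact h (pvFindFrom_past s sub start (by omega))
    have hspec := PySem.Chars.findFrom_natCast_spec s sub start hle h
    have h1 := hspec.1
    have hk : 1 ≤ sub.length := List.length_pos_iff.mpr hsub
    omega

-- Source B's inner while loop: count indices continuing the run (each = previous + k)
def pvTakeRun (k : Nat) (prev : Nat) : List Nat → Nat × List Nat
  | [] => (0, [])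
  | j :: t =>
    if j = prev + k then
      let r := pvTakeRun k j t
      (r.1 + 1, r.2)
    else (0, j :: t)

-- length fact for termination of the outer grouping loop
theorem pvTakeRun_len (k : Nat) (l : List Nat) : ∀ (prev : Nat),
    (pvTakeRun k prev l).2.length ≤ l.length := by
  induction l with
  | nil => intro prev; simp [pvTakeRun]
  | cons j t ih =>
    intro prev
    simp only [pvTakeRun]
    split
    · exact le_trans (ih j) (Nat.le_succ _)
    · simp

-- Source B's outer while loop: one (start, count) per maximal run
def pvGroupRuns (k : Nat) : List Nat → List (Int × Int)
  | [] => []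
  | i :: rest =>
    let r := pvTakeRun k i rest
    ((i : Int), ((r.1 + 1 : Nat) : Int)) :: pvGroupRuns k r.2
  termination_by l => l.length
  decreasing_by exact Nat.lt_succ_of_le (pvTakeRun_len k rest i)

def find_tandem_repeats_alt (sequence : String) (search : String) : List (Int × Int) :=
  if h : sequence = "" ∨ search = "" then []
  else
    let idxs := pvCollectIdxs sequence.toList search.toList
      (by intro hn; exact (not_or.mp h).2 (by simpa using hn)) 0
    pvGroupRuns search.toList.length idxs

-- ===== PRECONDITION & SPEC =====
def Spec_find_tandem_repeats (sequence : String) (search : String) (out : List (Int × Int)) : Prop := out = find_tandem_repeats_alt sequence search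
instance (sequence : String) (search : String) (out : List (Int × Int)) : Decidable (Spec_find_tandem_repeats sequence search out) := by unfold Spec_find_tandem_repeats; infer_instance

-- ===== CLAIM (what is proved, stated in full; the proofs are below) =====
def Claim_equal_find_tandem_repeats : Prop := ∀ (sequence : String) (search : String), Dom_find_tandem_repeats sequence search → Spec_find_tandem_repeats sequence search (find_tandem_repeats sequence search)

-- ===== LEMMAS AND PROOFS =====

-- first-occurrence characterisation: find returns r if sub matches at r and nowhere earlier
theorem pvFind_eq (s sub : List Char) (r : Nat)
    (h1 : sub <+: s.drop r) (h2 : ∀ i < r, ¬ sub <+: s.drop i) :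
    PySem.Chars.find s sub = (r : Int) := by
  have hin : sub <:+: s := h1.isInfix.trans (List.drop_suffix r s).isInfix
  have hnn : 0 ≤ PySem.Chars.find s sub :=
    (PySem.Chars.find_nonneg_iff s sub).mpr hin
  have hspec := PySem.Chars.find_spec hnn
  rcases lt_trichotomy (PySem.Chars.find s sub).toNat r with hlt | heq | hgt
  · exact absurd hspec.1 (h2 _ hlt)
  · omega
  · exact absurd h1 (hspec.2 r hgt)

-- cons step of find below an occurrence
theorem pvFind_cons (c : Char) (rest sub : List Char) (h : ¬ sub <+: (c :: rest)) :
    PySem.Chars.find (c :: rest) sub =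
      if PySem.Chars.find rest sub = -1 then -1 else PySem.Chars.find rest sub + 1 := by
  by_cases hr : PySem.Chars.find rest sub = -1
  · rw [if_pos hr]
    apply (PySem.Chars.find_eq_neg_one_iff _ _).mpr
    intro hin
    rcases List.infix_cons_iff.mp hin with hp | hi
    · exact h hp
    · exact (PySem.Chars.find_eq_neg_one_iff _ _).mp hr hi
  · rw [if_neg hr]
    have hnn : 0 ≤ PySem.Chars.find rest sub := by
      have := PySem.Chars.neg_one_le_find rest sub
      omega
    have hspec := PySem.Chars.find_spec hnn
    have := pvFind_eq (c :: rest) sub ((PySem.Chars.find rest sub).toNat + 1)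
      (by simpa using hspec.1)
      (by
        intro i hi
        match i with
        | 0 => simpa using h
        | j + 1 =>
          simp only [List.drop_succ_cons]
          exact hspec.2 j (by omega))
    rw [this]
    omega

-- recursive specification of str.split(sep): first occurrence, then recurse after it
def pvSplitRec (sep : List Char) (hsep : sep ≠ []) (s : List Char) : List (List Char) :=
  let r := PySem.Chars.find s sep
  if h : r = -1 then [s]
  else s.take r.toNat :: pvSplitRec sep hsep (s.drop (r.toNat + sep.length))
  termination_by s.length
  decreasing_by
    have hin : sep <:+: s := (PySem.Chars.find_ne_neg_one_iff s sep).mp h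
    have hk : 1 ≤ sep.length := List.length_pos_iff.mpr hsep
    have hs : sep.length ≤ s.length := hin.length_le
    simp only [List.length_drop]
    omega

theorem pvSplitRec_ne_nil (sep : List Char) (hsep : sep ≠ []) (s : List Char) :
    pvSplitRec sep hsep s ≠ [] := by
  rw [pvSplitRec]
  split <;> simp

theorem pvFind_nil_of_ne (sep : List Char) (hsep : sep ≠ []) :
    PySem.Chars.find [] sep = -1 :=
  (PySem.Chars.find_eq_neg_one_iff _ _).mpr (by intro hin; exact hsep (by simpa using hin))

theorem pvSplitOn_go_eq (sep : List Char) (hsep : sep ≠ []) (fuel : Nat) :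
    ∀ (l cur : List Char) (acc : List (List Char)), l.length < fuel →
      PySem.Chars.splitOn.go sep fuel l cur acc =
        acc.reverse ++ (pvSplitRec sep hsep l).modifyHead (cur.reverse ++ ·) := by
  have hk : 1 ≤ sep.length := List.length_pos_iff.mpr hsep
  induction fuel with
  | zero => intro l cur acc h; omega
  | succ f ih =>
    intro l cur acc h
    match l with
    | [] =>
      rw [pvSplitRec]
      simp [PySem.Chars.splitOn.go, pvFind_nil_of_ne sep hsep]
    | c :: rest =>
      by_cases hp : sep.isPrefixOf (c :: rest)
      · have hpre : sep <+: (c :: rest) := List.isPrefixOf_iff_prefix.mp hp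
        have hfind : PySem.Chars.find (c :: rest) sep = ((0 : Nat) : Int) :=
          pvFind_eq _ _ 0 (by simpa using hpre) (fun i hi => absurd hi (by omega))
        have hgo : PySem.Chars.splitOn.go sep (f + 1) (c :: rest) cur acc =
            PySem.Chars.splitOn.go sep f (List.drop sep.length (c :: rest)) [] (cur.reverse :: acc) := by
          simp [PySem.Chars.splitOn.go, hp]
        have hsr : pvSplitRec sep hsep (c :: rest) =
            [] :: pvSplitRec sep hsep (List.drop sep.length (c :: rest)) := by
          rw [pvSplitRec, hfind]
          norm_num
        rw [hgo, ih _ _ _ (by simp at h ⊢; omega), hsr]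
        cases pvSplitRec sep hsep (List.drop sep.length (c :: rest)) <;> simp
      · have hnpre : ¬ sep <+: (c :: rest) := fun hpre => hp (List.isPrefixOf_iff_prefix.mpr hpre)
        have hgo : PySem.Chars.splitOn.go sep (f + 1) (c :: rest) cur acc =
            PySem.Chars.splitOn.go sep f rest (c :: cur) acc := by
          simp [PySem.Chars.splitOn.go, hp]
        rw [hgo, ih _ _ _ (by simp at h ⊢; omega)]
        have hcons := pvFind_cons c rest sep hnpre
        by_cases hr : PySem.Chars.find rest sep = -1
        · have hA : pvSplitRec sep hsep (c :: rest) = [c :: rest] := by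
            rw [pvSplitRec]
            rw [dif_pos (by rw [hcons, if_pos hr])]
          have hB : pvSplitRec sep hsep rest = [rest] := by
            rw [pvSplitRec, dif_pos hr]
          rw [hA, hB]
          simp
        · have hnn : 0 ≤ PySem.Chars.find rest sep := by
            have := PySem.Chars.neg_one_le_find rest sep
            omega
          have htn : (PySem.Chars.find rest sep + 1).toNat = (PySem.Chars.find rest sep).toNat + 1 := by
            omega
          have hA : pvSplitRec sep hsep (c :: rest) =
              (c :: List.take (PySem.Chars.find rest sep).toNat rest) ::
                pvSplitRec sep hsep (List.drop ((PySem.Chars.find rest sep).toNat + sep.length) rest) := by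
            rw [pvSplitRec]
            rw [dif_neg (by rw [hcons, if_neg hr]; omega)]
            rw [hcons, if_neg hr, htn]
            simp only [List.take_succ_cons, Nat.add_right_comm, List.drop_succ_cons]
          have hB : pvSplitRec sep hsep rest =
              List.take (PySem.Chars.find rest sep).toNat rest ::
                pvSplitRec sep hsep (List.drop ((PySem.Chars.find rest sep).toNat + sep.length) rest) := by
            rw [pvSplitRec, dif_neg hr]
          rw [hA, hB]
          simp

theorem pvSplitOn_eq (sep : List Char) (hsep : sep ≠ []) (s : List Char) :
    PySem.Chars.splitOn s sep = pvSplitRec sep hsep s := by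
  have := pvSplitOn_go_eq sep hsep (s.length + 1) s [] [] (by omega)
  have hid : (pvSplitRec sep hsep s).modifyHead (fun x => x) = pvSplitRec sep hsep s := by
    cases pvSplitRec sep hsep s <;> simp
  simpa [PySem.Chars.splitOn, hid] using this

-- occurrence indices generated from the piece lengths after the first piece
def pvOccsFrom (k : Nat) (i : Nat) : List Nat → List Nat
  | [] => []
  | l :: t => i :: pvOccsFrom k (i + k + l) t

theorem pvOccsFrom_shift (k a : Nat) (ls : List Nat) : ∀ (i : Nat),
    pvOccsFrom k (i + a) ls = (pvOccsFrom k i ls).map (· + a) := by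
  induction ls with
  | nil => intro i; simp [pvOccsFrom]
  | cons l t ih =>
    intro i
    simp only [pvOccsFrom, List.map_cons, List.cons.injEq]
    refine ⟨trivial, ?_⟩
    rw [show i + a + k + l = (i + k + l) + a by ring]
    exact ih (i + k + l)

theorem pvFindFrom_shift (s sub : List Char) (hsub : sub ≠ []) (start a : Nat) :
    PySem.Chars.findFrom s sub ((start + a : Nat) : Int) none =
      (if PySem.Chars.findFrom (s.drop start) sub (a : Int) none = -1 then -1
       else (start : Int) + PySem.Chars.findFrom (s.drop start) sub (a : Int) none) := by
  by_cases hsa : start + a ≤ s.length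
  · have ha : a ≤ (s.drop start).length := by simp [List.length_drop]; omega
    rw [PySem.Chars.findFrom_natCast s sub (start + a) hsa,
        PySem.Chars.findFrom_natCast (s.drop start) sub a ha]
    rw [List.drop_drop]
    by_cases hF : PySem.Chars.find (List.drop (start + a) s) sub = -1
    · simp [hF]
    · have hnn : 0 ≤ PySem.Chars.find (List.drop (start + a) s) sub := by
        have := PySem.Chars.neg_one_le_find (List.drop (start + a) s) sub
        omega
      rw [if_neg hF, if_neg (by omega), if_neg (by omega)]
      push_cast
      ring
  · rw [pvFindFrom_past s sub (start + a) (by omega)]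
    by_cases ha : a ≤ (s.drop start).length
    · rw [PySem.Chars.findFrom_natCast (s.drop start) sub a ha]
      rw [List.drop_drop]
      rw [List.drop_eq_nil_of_le (by simp [List.length_drop] at ha; omega)]
      rw [pvFind_nil_of_ne sub hsub]
      simp
    · rw [pvFindFrom_past (s.drop start) sub a (by omega)]
      simp

theorem pvCollect_shift (sub : List Char) (hsub : sub ≠ []) (s : List Char) (start : Nat) :
    ∀ (a : Nat), pvCollectIdxs s sub hsub (start + a) =
      (pvCollectIdxs (s.drop start) sub hsub a).map (· + start) := by
  intro a
  fun_induction pvCollectIdxs (s.drop start) sub hsub a with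
  | case1 a r h =>
    have h' : PySem.Chars.findFrom (List.drop start s) sub (a : Int) none = -1 := h
    rw [pvCollectIdxs, dif_pos (by rw [pvFindFrom_shift s sub hsub start a, h']; simp)]
    simp
  | case2 a r h ih =>
    have h' : PySem.Chars.findFrom (List.drop start s) sub (a : Int) none ≠ -1 := h
    have hle : a ≤ (s.drop start).length := by
      by_contra hlt
      exact h' (pvFindFrom_past (s.drop start) sub a (by omega))
    have hspec := PySem.Chars.findFrom_natCast_spec (s.drop start) sub a hle h'
    have hnn : (0 : Int) ≤ PySem.Chars.findFrom (List.drop start s) sub (a : Int) none :=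
      le_trans (by exact_mod_cast Nat.zero_le a) hspec.1
    have hs : PySem.Chars.findFrom s sub ((start + a : Nat) : Int) none =
        (start : Int) + PySem.Chars.findFrom (List.drop start s) sub (a : Int) none := by
      rw [pvFindFrom_shift s sub hsub start a, if_neg h']
    rw [pvCollectIdxs, dif_neg (by rw [hs]; omega)]
    rw [hs]
    simp only [List.map_cons, List.cons.injEq]
    refine ⟨by omega, ?_⟩
    rw [show ((start : Int) + PySem.Chars.findFrom (List.drop start s) sub (a : Int) none).toNat + sub.length =
        start + ((PySem.Chars.findFrom (List.drop start s) sub (a : Int) none).toNat + sub.length) from by omega]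
    exact ih

theorem pvCollect_eq_occs (sub : List Char) (hsub : sub ≠ []) (s : List Char) :
    pvCollectIdxs s sub hsub 0 =
      match pvSplitRec sub hsub s with
      | [] => []
      | p :: t => pvOccsFrom sub.length p.length (t.map List.length) := by
  fun_induction pvSplitRec sub hsub s with
  | case1 s r h =>
    have h0 : PySem.Chars.findFrom s sub ((0 : Nat) : Int) none = -1 := by
      rw [show ((0 : Nat) : Int) = (0 : Int) from rfl, PySem.Chars.findFrom_zero]
      exact h
    rw [pvCollectIdxs, dif_pos h0]
    simp [pvOccsFrom]
  | case2 s r h ih =>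
    have hr : r = PySem.Chars.find s sub := rfl
    have hnn : (0 : Int) ≤ r := by
      have := PySem.Chars.neg_one_le_find s sub
      have h' : r ≠ -1 := h
      omega
    have h0 : PySem.Chars.findFrom s sub ((0 : Nat) : Int) none = r := by
      rw [show ((0 : Nat) : Int) = (0 : Int) from rfl, PySem.Chars.findFrom_zero, hr]
    have hlen : r.toNat ≤ s.length := by
      have := PySem.Chars.find_le_length s sub
      omega
    rw [pvCollectIdxs, dif_neg (by rw [h0]; exact h)]
    rw [h0]
    rcases hne : pvSplitRec sub hsub (List.drop (r.toNat + sub.length) s)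
      with _ | ⟨p', t'⟩
    · exact absurd hne (pvSplitRec_ne_nil sub hsub _)
    · rw [hne] at ih
      simp only [List.map_cons, List.length_take, Nat.min_eq_left hlen, pvOccsFrom,
        List.cons.injEq]
      refine ⟨trivial, ?_⟩
      have hsh := pvCollect_shift sub hsub s (r.toNat + sub.length) 0
      rw [Nat.add_zero] at hsh
      rw [hsh, ih]
      rw [show r.toNat + sub.length + p'.length =
          p'.length + (r.toNat + sub.length) from by omega]
      rw [pvOccsFrom_shift sub.length (r.toNat + sub.length)
        (t'.map List.length) p'.length]

-- A's loop as pure recursion over the remaining piece lengths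
def pvALoop (k : Nat) (pos rep : Int) (pend : Bool) : List Nat → List (Int × Int)
  | [] => if pend then [(pos, rep)] else []
  | l :: t =>
    if (l : Int) = 0 then pvALoop k pos (rep + 1) true t
    else (pos, rep + 1) :: pvALoop k (pos + l + k * (rep + 1)) 0 false t

theorem pvFold_eq_aloop (k : Nat) (lns : List Nat) :
    ∀ (pos rep : Int) (pend : Bool) (out : List (Int × Int)),
      (let st := (List.map (fun (n : Nat) => (n : Int)) lns).foldl
          (fun (st : Int × Int × Bool × List (Int × Int)) l =>
            if l = 0 then (st.1, st.2.1 + 1, true, st.2.2.2)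
            else (st.1 + l + (k : Int) * (st.2.1 + 1), 0, false,
                  st.2.2.2 ++ [(st.1, st.2.1 + 1)]))
          (pos, rep, pend, out)
       if st.2.2.1 then st.2.2.2 ++ [(st.1, st.2.1)] else st.2.2.2)
      = out ++ pvALoop k pos rep pend lns := by
  induction lns with
  | nil =>
    intro pos rep pend out
    cases pend <;> simp [pvALoop]
  | cons n t ih =>
    intro pos rep pend out
    by_cases h : (n : Int) = 0
    · simp only [List.map_cons, List.foldl_cons]
      rw [if_pos h]
      have := ih pos (rep + 1) true out
      simp only [] at this ⊢
      rw [this]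
      have h0 : n = 0 := by exact_mod_cast h
      simp [pvALoop, h0]
    · simp only [List.map_cons, List.foldl_cons]
      rw [if_neg h]
      have := ih (pos + n + (k : Int) * (rep + 1)) 0 false (out ++ [(pos, rep + 1)])
      simp only [] at this ⊢
      rw [this]
      have hn : n ≠ 0 := by exact_mod_cast h
      simp [pvALoop, hn]

theorem pvTakeRun_stop (k prev i : Nat) (t : List Nat) (h : i ≠ prev + k) :
    pvTakeRun k prev (pvOccsFrom k i t) = (0, pvOccsFrom k i t) := by
  cases t <;> simp [pvOccsFrom, pvTakeRun, h]

theorem pvMain (k : Nat) (t : List Nat) :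
    ∀ (pos rep : Nat),
      (pvALoop k (pos : Int) 0 false t = pvGroupRuns k (pvOccsFrom k pos t)) ∧
      (pvALoop k (pos : Int) ((rep : Int) + 1) true t =
        ((pos : Int), ((rep + 1 + (pvTakeRun k (pos + rep * k) (pvOccsFrom k (pos + (rep + 1) * k) t)).1 : Nat) : Int)) ::
          pvGroupRuns k (pvTakeRun k (pos + rep * k) (pvOccsFrom k (pos + (rep + 1) * k) t)).2) := by
  induction t with
  | nil =>
    intro pos rep
    refine ⟨by simp [pvALoop, pvOccsFrom, pvGroupRuns], ?_⟩
    simp [pvALoop, pvOccsFrom, pvTakeRun, pvGroupRuns]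
  | cons l t ih =>
    intro pos rep
    constructor
    · -- between runs, next piece l
      by_cases h : l = 0
      · subst h
        have h1 : pvALoop k (pos : Int) 0 false (0 :: t) = pvALoop k (pos : Int) ((0 : Int) + 1) true t := by
          simp [pvALoop]
        rw [h1, show ((0 : Int) + 1) = (((0 : Nat) : Int) + 1) by norm_num]
        rw [(ih pos 0).2]
        simp only [pvOccsFrom, pvGroupRuns]
        norm_num
        omega
      · have h1 : pvALoop k (pos : Int) 0 false (l :: t) =
            ((pos : Int), (0 : Int) + 1) :: pvALoop k ((pos : Int) + l + k * ((0 : Int) + 1)) 0 false t := by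
          simp [pvALoop, h]
        rw [h1, show ((pos : Int) + l + k * ((0 : Int) + 1)) = ((pos + l + k : Nat) : Int) by push_cast; ring]
        rw [((ih (pos + l + k) 0).1 :)]
        simp only [pvOccsFrom, pvGroupRuns]
        rw [pvTakeRun_stop k pos (pos + k + l) t (by omega)]
        simp only []
        rw [show pos + l + k = pos + k + l by ring]
        norm_num
    · -- mid-run (pending), next piece l
      by_cases h : l = 0
      · subst h
        have h1 : pvALoop k (pos : Int) ((rep : Int) + 1) true (0 :: t) =
            pvALoop k (pos : Int) (((rep + 1 : Nat) : Int) + 1) true t := by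
          simp [pvALoop]
        rw [h1, (ih pos (rep + 1)).2]
        have e0 : pvOccsFrom k (pos + (rep + 1) * k) (0 :: t) =
            (pos + rep * k + k) :: pvOccsFrom k (pos + (rep + 1 + 1) * k) t := by
          simp only [pvOccsFrom, List.cons.injEq]
          refine ⟨by ring, ?_⟩
          congr 1
          ring
        rw [e0]
        simp only [pvTakeRun, if_true]
        rw [show pos + (rep + 1) * k = pos + rep * k + k from by ring]
        simp only [List.cons.injEq, Prod.mk.injEq]
        refine ⟨⟨trivial, ?_⟩, trivial⟩
        push_cast
        ring
      · have h1 : pvALoop k (pos : Int) ((rep : Int) + 1) true (l :: t) =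
            ((pos : Int), (rep : Int) + 1 + 1) ::
              pvALoop k ((pos : Int) + l + k * ((rep : Int) + 1 + 1)) 0 false t := by
          have hn : l ≠ 0 := h
          simp [pvALoop, hn]
        rw [h1,
          show ((pos : Int) + l + k * ((rep : Int) + 1 + 1)) = ((pos + l + k * (rep + 2) : Nat) : Int) by push_cast; ring]
        rw [((ih (pos + l + k * (rep + 2)) 0).1 :)]
        have e0 : pvOccsFrom k (pos + (rep + 1) * k) (l :: t) =
            (pos + rep * k + k) :: pvOccsFrom k (pos + l + k * (rep + 2)) t := by
          simp only [pvOccsFrom, List.cons.injEq]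
          refine ⟨by ring, ?_⟩
          congr 1
          ring
        rw [e0]
        simp only [pvTakeRun, if_true]
        rw [pvTakeRun_stop k (pos + rep * k + k) (pos + l + k * (rep + 2)) t
          (by have hkr : k * (rep + 2) = rep * k + 2 * k := by ring
              omega)]
        simp only [List.cons.injEq, Prod.mk.injEq]
        refine ⟨⟨trivial, ?_⟩, trivial⟩
        push_cast
        ring

-- ===== VERDICT (by name: the statement is the Claim_ definition above) =====
theorem find_tandem_repeats_spec : Claim_equal_find_tandem_repeats := by
  unfold Claim_equal_find_tandem_repeats
  intro sequence search _hdom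
  unfold Spec_find_tandem_repeats
  unfold find_tandem_repeats find_tandem_repeats_alt
  by_cases hg : sequence = "" ∨ search = ""
  · rw [if_pos hg, dif_pos hg]
  · rw [if_neg hg, dif_neg hg]
    have hsep : search.toList ≠ [] := by
      intro hn
      exact (not_or.mp hg).2 (by simpa using hn)
    rw [pvSplitOn_eq search.toList hsep sequence.toList]
    obtain ⟨p0, t, hsplit⟩ : ∃ p0 t, pvSplitRec search.toList hsep sequence.toList = p0 :: t := by
      rcases hx : pvSplitRec search.toList hsep sequence.toList with _ | ⟨p0, t⟩
      · exact absurd hx (pvSplitRec_ne_nil search.toList hsep sequence.toList)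
      · exact ⟨p0, t, rfl⟩
    rw [hsplit]
    have hB := pvCollect_eq_occs search.toList hsep sequence.toList
    rw [hsplit] at hB
    simp only [List.map_cons]
    have hmm : (t.map (fun p => ((p.length : Nat) : Int))) =
        List.map (fun (n : Nat) => (n : Int)) (t.map List.length) := by
      simp [List.map_map]
    have hlen : (PySem.Str.len search : Int) = ((search.toList.length : Nat) : Int) := by
      simp [PySem.Str.len]
    rw [hmm, hlen]
    have hA := pvFold_eq_aloop search.toList.length (t.map List.length)
      ((p0.length : Nat) : Int) 0 false []
    simp only [] at hA
    rw [hA]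
    rw [hB]
    simp only [List.nil_append]
    exact (pvMain search.toList.length (t.map List.length) p0.length 0).1
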